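-- pv_equiv track=rewrite | github.com/shanif3/MicrobioTa | src/training/utils.py | calc_dist_pair_split
-- ===== SOURCE A (Python) =====
-- def calc_dist_pair_split(l1, l2) -> int:
--     if l1 == l2:
--         return 0  # exact match
--
--     len_l1, len_l2 = len(l1), len(l2)
--     min_len = min(len_l1, len_l2)
--
--     for k, (s1, s2) in enumerate(zip(l1[:min_len], l2[:min_len])):
--         if s1 != s2:
--             return (len_l1 - k) + (len_l2 - k)
--     return abs(len_l1 - len_l2)
-- ===== SOURCE B (Python) =====
-- def calc_dist_pair_split(l1, l2) -> int:
--     # Binary search for the longest m with l1[:m] == l2[:m]; prefix equality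
--     # is monotone in m, so the largest such m is the common-prefix length.
--     lo, hi = 0, min(len(l1), len(l2))
--     while lo < hi:
--         mid = (lo + hi + 1) // 2
--         if l1[:mid] == l2[:mid]:
--             lo = mid
--         else:
--             hi = mid - 1
--     return len(l1) + len(l2) - 2 * lo
-- ===== Notes on version B (the rewrite author's own statement) =====
-- stated objective: alternative
-- what changed: Replaces A's linear element-by-element scan with early returns by a binary search over the monotone slice-equality predicate l1[:m]==l2[:m] to find the common-prefix length, then one closed-form return len(l1)+len(l2)-2*p; trades the linear scan for O(log n) slice comparisons.
import Mathlib
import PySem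

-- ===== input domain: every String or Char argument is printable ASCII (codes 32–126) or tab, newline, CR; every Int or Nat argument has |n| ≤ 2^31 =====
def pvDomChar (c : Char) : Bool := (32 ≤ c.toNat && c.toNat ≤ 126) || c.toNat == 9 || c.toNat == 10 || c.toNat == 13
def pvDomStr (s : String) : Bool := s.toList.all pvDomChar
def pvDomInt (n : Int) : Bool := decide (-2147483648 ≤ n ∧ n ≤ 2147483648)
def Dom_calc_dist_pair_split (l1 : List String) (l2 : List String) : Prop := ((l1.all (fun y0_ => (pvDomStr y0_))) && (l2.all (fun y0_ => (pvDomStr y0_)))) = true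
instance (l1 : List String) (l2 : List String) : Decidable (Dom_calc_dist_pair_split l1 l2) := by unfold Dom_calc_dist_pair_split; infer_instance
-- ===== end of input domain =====

-- B finds the common-prefix length by binary search on the monotone slice-equality
-- predicate l1[:m]==l2[:m] and returns the closed form len(l1)+len(l2)-2*p
-- (objective: alternative algorithm; not claimed faster).

-- ===== PORT A =====
-- the early-returning `for k, (s1, s2) in enumerate(zip(...))` loop, k carried explicitly
def pvALoop (len1 len2 : Int) (k : Int) : List (String × String) → Int
  | [] => ((len1 - len2).natAbs : Int)                    -- `return abs(len_l1 - len_l2)`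
  | (s1, s2) :: rest =>
      if s1 ≠ s2 then (len1 - k) + (len2 - k)             -- early return at first mismatch
      else pvALoop len1 len2 (k + 1) rest

def calc_dist_pair_split (l1 : List String) (l2 : List String) : Int :=
  if l1 == l2 then 0
  else
    let len1 : Int := l1.length
    let len2 : Int := l2.length
    let minLen : Nat := min l1.length l2.length
    pvALoop len1 len2 0 (List.zip (l1.take minLen) (l2.take minLen))

-- ===== PORT B =====
-- the `while lo < hi` binary-search loop; lo, hi are nonnegative Python ints, so Nat
-- with Nat division matches `(lo + hi + 1) // 2`; `l1[:mid]` with mid ≥ 0 is `take mid`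
def pvBSearch (l1 l2 : List String) (lo hi : Nat) : Nat :=
  if _h : lo < hi then
    let mid := (lo + hi + 1) / 2
    if l1.take mid == l2.take mid then pvBSearch l1 l2 mid hi
    else pvBSearch l1 l2 lo (mid - 1)
  else lo
termination_by hi - lo
decreasing_by all_goals omega

def calc_dist_pair_split_alt (l1 : List String) (l2 : List String) : Int :=
  (l1.length : Int) + (l2.length : Int)
    - 2 * ((pvBSearch l1 l2 0 (min l1.length l2.length) : Nat) : Int)

-- ===== PRECONDITION & SPEC =====
def Spec_calc_dist_pair_split (l1 : List String) (l2 : List String) (out : Int) : Prop := out = calc_dist_pair_split_alt l1 l2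
instance (l1 : List String) (l2 : List String) (out : Int) : Decidable (Spec_calc_dist_pair_split l1 l2 out) := by unfold Spec_calc_dist_pair_split; infer_instance

-- ===== CLAIM (what is proved, stated in full; the proofs are below) =====
def Claim_equal_calc_dist_pair_split : Prop := ∀ (l1 : List String) (l2 : List String), Dom_calc_dist_pair_split l1 l2 → Spec_calc_dist_pair_split l1 l2 (calc_dist_pair_split l1 l2)

-- ===== LEMMAS AND PROOFS =====

-- common-prefix length of the zipped pair list (proof-side characterisation)
def pvPrefLen : List (String × String) → Nat
  | [] => 0
  | (a, b) :: rest => if a ≠ b then 0 else 1 + pvPrefLen rest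

-- zipping the `[:min_len]` slices is the same as zipping the full lists
theorem zip_take_min (l1 l2 : List String) :
    List.zip (l1.take (min l1.length l2.length)) (l2.take (min l1.length l2.length))
      = List.zip l1 l2 := by
  induction l1 generalizing l2 with
  | nil => simp
  | cons a as ih =>
    cases l2 with
    | nil => simp
    | cons b bs =>
      simp only [List.length_cons, List.zip_cons_cons, Nat.min_def]
      split_ifs with h
      · simp only [List.take_succ_cons, List.zip_cons_cons, List.cons.injEq, true_and]
        have := ih bs
        rwa [Nat.min_def, if_pos (by omega)] at this
      · simp only [List.take_succ_cons, List.zip_cons_cons, List.cons.injEq, true_and]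
        have := ih bs
        rwa [Nat.min_def, if_neg (by omega)] at this

theorem prefLen_le_length (zs : List (String × String)) : pvPrefLen zs ≤ zs.length := by
  induction zs with
  | nil => simp [pvPrefLen]
  | cons p rest ih =>
    obtain ⟨a, b⟩ := p
    simp only [pvPrefLen, List.length_cons]
    split_ifs <;> omega

-- A's loop, expressed through the common-prefix length of the zipped list
theorem aLoop_eq (zs : List (String × String)) (len1 len2 k : Int) :
    pvALoop len1 len2 k zs =
      (if pvPrefLen zs = zs.length then ((len1 - len2).natAbs : Int)
       else len1 + len2 - 2 * (k + (pvPrefLen zs : Int))) := by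
  induction zs generalizing k with
  | nil => simp [pvALoop, pvPrefLen]
  | cons p rest ih =>
    obtain ⟨a, b⟩ := p
    by_cases hab : a ≠ b
    · have hlen := prefLen_le_length rest
      simp only [pvALoop, pvPrefLen, if_pos hab, List.length_cons]
      rw [if_neg (by omega)]
      push_cast; ring
    · simp only [pvALoop, pvPrefLen, if_neg hab, List.length_cons, ih (k + 1)]
      by_cases h : pvPrefLen rest = rest.length
      · rw [if_pos h, if_pos (by omega)]
      · rw [if_neg h, if_neg (by omega)]
        push_cast; ring

theorem prefLen_zip_self (l : List String) : pvPrefLen (List.zip l l) = l.length := by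
  induction l with
  | nil => simp [pvPrefLen]
  | cons a as ih => simp [pvPrefLen, ih]; omega

-- prefix-slice equality is exactly `m ≤ common prefix length`, for m within both lists
theorem take_eq_iff (l1 : List String) : ∀ (l2 : List String) (m : Nat),
    m ≤ min l1.length l2.length →
    (l1.take m = l2.take m ↔ m ≤ pvPrefLen (List.zip l1 l2)) := by
  induction l1 with
  | nil => intro l2 m hm; simp at hm; simp [hm, pvPrefLen]
  | cons a as ih =>
    intro l2 m hm
    cases l2 with
    | nil => simp at hm; simp [hm]
    | cons b bs =>
      cases m with
      | zero => simp
      | succ k =>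
        simp only [List.length_cons, Nat.min_def] at hm
        have hk : k ≤ min as.length bs.length := by split_ifs at hm <;> omega
        simp only [List.take_succ_cons, List.zip_cons_cons, pvPrefLen]
        by_cases hab : a ≠ b
        · simp only [if_pos hab]
          constructor
          · intro h; exact absurd (List.cons.injEq .. ▸ congrArg id h) (by simp [hab])
          · omega
        · push_neg at hab
          subst hab
          rw [if_neg (by simp)]
          simp only [List.cons.injEq, true_and]
          rw [ih bs k hk]; omega

-- the binary search returns the common prefix length whenever it brackets it
theorem bsearch_eq (l1 l2 : List String) : ∀ (n lo hi : Nat), hi - lo ≤ n →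
    lo ≤ pvPrefLen (List.zip l1 l2) → pvPrefLen (List.zip l1 l2) ≤ hi →
    hi ≤ min l1.length l2.length →
    pvBSearch l1 l2 lo hi = pvPrefLen (List.zip l1 l2) := by
  intro n
  induction n with
  | zero =>
    intro lo hi hn hlo hhi _
    rw [pvBSearch, dif_neg (by omega)]; omega
  | succ n ih =>
    intro lo hi hn hlo hhi hmin
    rw [pvBSearch]
    by_cases h : lo < hi
    · rw [dif_pos h]
      have hmid1 : lo < (lo + hi + 1) / 2 := by omega
      have hmid2 : (lo + hi + 1) / 2 ≤ hi := by omega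
      have hiff := take_eq_iff l1 l2 ((lo + hi + 1) / 2) (by omega)
      by_cases ht : l1.take ((lo + hi + 1) / 2) = l2.take ((lo + hi + 1) / 2)
      · rw [if_pos (by simpa using ht)]
        exact ih _ _ (by omega) (hiff.mp ht) hhi hmin
      · rw [if_neg (by simpa using ht)]
        have : ¬ ((lo + hi + 1) / 2 ≤ pvPrefLen (List.zip l1 l2)) := fun hc => ht (hiff.mpr hc)
        exact ih _ _ (by omega) hlo (by omega) (by omega)
    · rw [dif_neg h]; omega

-- ===== VERDICT (by name: the statement is the Claim_ definition above) =====
theorem calc_dist_pair_split_spec : Claim_equal_calc_dist_pair_split := by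
  intro l1 l2 _
  have hp : pvPrefLen (List.zip l1 l2) ≤ min l1.length l2.length := by
    have := prefLen_le_length (List.zip l1 l2)
    simpa [List.length_zip] using this
  have hb : pvBSearch l1 l2 0 (min l1.length l2.length) = pvPrefLen (List.zip l1 l2) :=
    bsearch_eq l1 l2 (min l1.length l2.length) 0 _ (by omega) (by omega) hp le_rfl
  unfold Spec_calc_dist_pair_split calc_dist_pair_split calc_dist_pair_split_alt
  rw [hb]
  by_cases heq : l1 = l2
  · subst heq
    rw [if_pos (by simp), prefLen_zip_self]
    ring
  · rw [if_neg (by simpa using heq)]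
    show pvALoop (l1.length : Int) (l2.length : Int) 0
        (List.zip (l1.take (min l1.length l2.length)) (l2.take (min l1.length l2.length))) = _
    rw [zip_take_min, aLoop_eq]
    by_cases h : pvPrefLen (List.zip l1 l2) = (List.zip l1 l2).length
    · rw [if_pos h]
      have hz : (List.zip l1 l2).length = min l1.length l2.length := List.length_zip
      omega
    · rw [if_neg h]
      ring
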